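-- pv_equiv track=rewrite | github.com/lamiaakhairyibrahim/Leetcode-solve-problems | easy/problem_solving_leetcode_easy.py | two_list
-- ===== SOURCE A (Python) =====
-- def two_list(nums1 , nums2):
--     nums3 = []
--     short = min(len(nums1 ), len(nums2))
--     longest = max(len(nums1),len(nums2))
--     for i in range(longest):
--         if i < short :
--             nums3.append(min(nums1[i] , nums2[i]))
--             nums3.append(max(nums1[i] , nums2[i]))
--         elif len(nums1) > len(nums2) :
--              nums3.append(nums1[i])
--         else:
--              nums3.append(nums2[i])
--     return nums3
-- ===== SOURCE B (Python) =====
-- def two_list(nums1, nums2):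
--     short = min(len(nums1), len(nums2))
--     longer = nums1 if len(nums1) > len(nums2) else nums2
--     out = [0] * (short + len(longer))
--     out[0:2 * short:2] = map(min, nums1, nums2)
--     out[1:2 * short:2] = map(max, nums1, nums2)
--     out[2 * short:] = longer[short:]
--     return out
-- ===== Notes on version B (the rewrite author's own statement) =====
-- stated objective: alternative
-- what changed: Replaces A's single range(longest) loop with a three-way index branch by a preallocated output array filled in three bulk passes: elementwise mins into even slots, elementwise maxes into odd slots (strided slice assignments from map(min/max,...)), and the longer list's tail copied at the end; no explicit per-element loop or branching remains.
import Mathlib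
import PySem

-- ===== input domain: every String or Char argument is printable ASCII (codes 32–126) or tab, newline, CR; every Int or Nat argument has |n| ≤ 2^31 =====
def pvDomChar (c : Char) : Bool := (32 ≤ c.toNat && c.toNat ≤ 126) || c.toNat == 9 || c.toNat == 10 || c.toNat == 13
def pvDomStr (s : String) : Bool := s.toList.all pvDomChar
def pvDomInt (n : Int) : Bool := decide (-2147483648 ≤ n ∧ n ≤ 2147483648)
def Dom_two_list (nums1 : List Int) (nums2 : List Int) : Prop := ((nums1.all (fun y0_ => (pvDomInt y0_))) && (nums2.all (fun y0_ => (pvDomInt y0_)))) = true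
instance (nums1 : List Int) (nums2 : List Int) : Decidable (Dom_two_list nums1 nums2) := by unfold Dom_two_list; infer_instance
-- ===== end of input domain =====

-- B replaces A's single index loop with its three-way branch by a preallocated output filled in
-- three bulk passes (mins into even slots, maxes into odd slots, tail copy) — objective: alternative, same cost.

-- ===== PORT A =====
-- Port of A: one index loop over range(longest) with a three-way branch.
def two_list (nums1 : List Int) (nums2 : List Int) : List Int :=
  let short : Int := min (nums1.length : Int) (nums2.length : Int)
  let longest : Int := max (nums1.length : Int) (nums2.length : Int)
  (PySem.List.pyRange 0 longest 1).foldl (fun nums3 i =>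
    if i < short then
      nums3 ++ [min (PySem.List.pyGetD nums1 i 0) (PySem.List.pyGetD nums2 i 0),
                max (PySem.List.pyGetD nums1 i 0) (PySem.List.pyGetD nums2 i 0)]
    else if (nums1.length : Int) > (nums2.length : Int) then
      nums3 ++ [PySem.List.pyGetD nums1 i 0]
    else
      nums3 ++ [PySem.List.pyGetD nums2 i 0]) []

-- ===== PORT B =====
-- models Source B's two strided slice assignments out[0::2]=mins, out[1::2]=maxs over the pair region:
-- the even slots come from the first list, the odd slots from the second.
def pvStride2Fill : List Int → List Int → List Int
  | [], _ => []
  | a :: _, [] => [a]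
  | a :: as, b :: bs => a :: b :: pvStride2Fill as bs

-- Port of B: bulk elementwise mins/maxes (map(min,...)/map(max,...) = zipWith), strided fill, tail slice.
def two_list_alt (nums1 : List Int) (nums2 : List Int) : List Int :=
  let short : Int := min (nums1.length : Int) (nums2.length : Int)
  let longer := if (nums1.length : Int) > (nums2.length : Int) then nums1 else nums2
  let mins := List.zipWith min nums1 nums2
  let maxs := List.zipWith max nums1 nums2
  pvStride2Fill mins maxs ++ PySem.List.slice longer (some short) none

-- ===== PRECONDITION & SPEC =====
def Spec_two_list (nums1 : List Int) (nums2 : List Int) (out : List Int) : Prop := out = two_list_alt nums1 nums2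
instance (nums1 : List Int) (nums2 : List Int) (out : List Int) : Decidable (Spec_two_list nums1 nums2 out) := by unfold Spec_two_list; infer_instance

-- ===== CLAIM (what is proved, stated in full; the proofs are below) =====
def Claim_equal_two_list : Prop := ∀ (nums1 : List Int) (nums2 : List Int), Dom_two_list nums1 nums2 → Spec_two_list nums1 nums2 (two_list nums1 nums2)

-- ===== LEMMAS AND PROOFS =====

theorem pvFlatMap_congr_mem {a b : Type} (l : List a) (f g : a → List b)
    (h : ∀ x ∈ l, f x = g x) : l.flatMap f = l.flatMap g := by
  induction l with
  | nil => rfl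
  | cons x t ih =>
      simp only [List.flatMap_cons]
      rw [h x (by simp), ih (fun y hy => h y (by simp [hy]))]

-- the index loop over the common prefix produces exactly the zip of the two lists
theorem pvMapPair (nums1 nums2 : List Int) :
    (PySem.List.pyRange 0 (min (nums1.length : Int) (nums2.length : Int)) 1).map
      (fun i => (PySem.List.pyGetD nums1 i 0, PySem.List.pyGetD nums2 i 0))
    = nums1.zip nums2 := by
  apply List.ext_getElem
  · simp [PySem.List.length_pyRange_one]
    omega
  · intro k h1 h2
    have hk1 : k < nums1.length := by simp at h2; omega
    have hk2 : k < nums2.length := by simp at h2; omega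
    simp only [List.getElem_map, PySem.List.getElem_pyRange_one, List.getElem_zip]
    have : ((0 : Int) + (k : Int)) = ((k : Nat) : Int) := by omega
    rw [this, PySem.List.pyGetD_natCast, PySem.List.pyGetD_natCast,
      List.getD_eq_getElem _ _ hk1, List.getD_eq_getElem _ _ hk2]

-- emitting [min,max] per pair equals filling even slots with mins and odd slots with maxes
theorem pvStride2Fill_eq_flatMap (l1 l2 : List Int) :
    (l1.zip l2).flatMap (fun p => [min p.1 p.2, max p.1 p.2])
      = pvStride2Fill (List.zipWith min l1 l2) (List.zipWith max l1 l2) := by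
  induction l1 generalizing l2 with
  | nil => cases l2 <;> rfl
  | cons a as ih =>
      cases l2 with
      | nil => rfl
      | cons b bs => simp [pvStride2Fill, ih]

-- ===== VERDICT (by name: the statement is the Claim_ definition above) =====
theorem two_list_spec : Claim_equal_two_list := by
  intro nums1 nums2 _
  unfold Spec_two_list two_list two_list_alt
  simp only []
  have hstep : (fun (nums3 : List Int) (i : Int) =>
        if i < min (nums1.length : Int) (nums2.length : Int) then
          nums3 ++ [min (PySem.List.pyGetD nums1 i 0) (PySem.List.pyGetD nums2 i 0),
                    max (PySem.List.pyGetD nums1 i 0) (PySem.List.pyGetD nums2 i 0)]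
        else if (nums1.length : Int) > (nums2.length : Int) then
          nums3 ++ [PySem.List.pyGetD nums1 i 0]
        else
          nums3 ++ [PySem.List.pyGetD nums2 i 0])
      = (fun (nums3 : List Int) (i : Int) =>
        nums3 ++ (if i < min (nums1.length : Int) (nums2.length : Int) then
            [min (PySem.List.pyGetD nums1 i 0) (PySem.List.pyGetD nums2 i 0),
             max (PySem.List.pyGetD nums1 i 0) (PySem.List.pyGetD nums2 i 0)]
          else if (nums1.length : Int) > (nums2.length : Int) then
            [PySem.List.pyGetD nums1 i 0]
          else
            [PySem.List.pyGetD nums2 i 0])) := by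
    funext acc i; split_ifs <;> rfl
  rw [hstep]
  rw [PySem.List.foldl_append_eq_flatMap]
  simp only [List.nil_append]
  rw [PySem.List.pyRange_one_append 0 (min (nums1.length : Int) (nums2.length : Int))
      (max (nums1.length : Int) (nums2.length : Int)) (by positivity) (by omega),
    List.flatMap_append]
  congr 1
  · -- common prefix: equals B's strided min/max fill
    rw [pvFlatMap_congr_mem _ _
        (fun i => [min (PySem.List.pyGetD nums1 i 0) (PySem.List.pyGetD nums2 i 0),
                   max (PySem.List.pyGetD nums1 i 0) (PySem.List.pyGetD nums2 i 0)])
        (by intro i hi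
            rw [PySem.List.mem_pyRange_one] at hi
            simp only [if_pos hi.2])]
    rw [← pvStride2Fill_eq_flatMap, ← pvMapPair nums1 nums2, List.flatMap_map]
  · -- leftover tail: equals B's slice of the longer list
    by_cases h : (nums1.length : Int) > (nums2.length : Int)
    · rw [pvFlatMap_congr_mem _ _ (fun i => [PySem.List.pyGetD nums1 i 0])
          (by intro i hi
              rw [PySem.List.mem_pyRange_one] at hi
              rw [if_neg (by omega), if_pos h])]
      rw [min_eq_right (le_of_lt h), max_eq_left (le_of_lt h)]
      rw [if_pos h, PySem.List.slice_from _ (by positivity)]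
      rw [← List.map_eq_flatMap]
      rw [PySem.List.map_pyGetD_pyRange' (xs := nums1) (d := 0) (a := (nums2.length : Int)) (by positivity)]
    · rw [pvFlatMap_congr_mem _ _ (fun i => [PySem.List.pyGetD nums2 i 0])
          (by intro i hi
              rw [PySem.List.mem_pyRange_one] at hi
              rw [if_neg (by omega), if_neg h])]
      rw [min_eq_left (by omega), max_eq_right (by omega)]
      rw [if_neg h, PySem.List.slice_from _ (by positivity)]
      rw [← List.map_eq_flatMap]
      rw [PySem.List.map_pyGetD_pyRange' (xs := nums2) (d := 0) (a := (nums1.length : Int)) (by positivity)]
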